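-- pv_equiv track=rewrite | github.com/xpessoles/Informatique_PDF | 2021_2022/pdf/TP14_Piles_Files_c_JP.py | depilenumero
-- ===== SOURCE A (Python) =====
-- from collections import deque
--
-- def depilenumero(pile,k):
--     depile=deque()
--     for i in range(k):
--         depile.append(pile.pop())
--     element=depile.pop()
--     for i in range(len(depile)):
--         pile.append(depile.pop())
--     return(pile, element)
-- ===== SOURCE B (Python) =====
-- def depilenumero(pile, k):
--     if k < 1 or k > len(pile):
--         raise IndexError("k out of range")
--     element = pile.pop(len(pile) - k)
--     return (pile, element)
-- ===== Notes on version B (the rewrite author's own statement) =====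
-- stated objective: simpler
-- what changed: Replaces the two deque-transfer loops (pop k elements onto a deque, pop the target, push the rest back) by a direct index computation idx = len(pile) - k and a single list.pop(idx), with an explicit range guard so it raises IndexError exactly where A's empty pops do.
import Mathlib
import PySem

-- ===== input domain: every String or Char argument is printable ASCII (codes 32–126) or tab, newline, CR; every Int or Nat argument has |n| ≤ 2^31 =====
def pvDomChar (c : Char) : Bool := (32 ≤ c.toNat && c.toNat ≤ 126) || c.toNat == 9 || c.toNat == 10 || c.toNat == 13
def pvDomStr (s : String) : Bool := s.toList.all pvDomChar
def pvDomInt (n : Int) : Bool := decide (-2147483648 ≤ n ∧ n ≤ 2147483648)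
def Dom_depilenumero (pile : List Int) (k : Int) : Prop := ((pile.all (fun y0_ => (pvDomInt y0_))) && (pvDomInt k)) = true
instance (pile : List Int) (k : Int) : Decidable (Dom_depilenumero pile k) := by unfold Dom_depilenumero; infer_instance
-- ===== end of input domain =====

-- B replaces A's two deque-transfer loops by one direct list.pop at index len(pile)-k
-- (simpler; return-value equivalence only — both Pythons mutate `pile` in place the same way).

-- ===== PORT A =====
-- state of A's loops: (pile, depile); `none` = an IndexError has occurred
def stepA_depilenumero (st : Option (List Int × List Int)) : Option (List Int × List Int) :=
  match st with
  | none => none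
  | some (p, d) =>
    match PySem.List.pop? p (-1) with      -- pile.pop()
    | none => none
    | some (x, p') => some (p', d ++ [x])  -- depile.append(...)

def stepA2_depilenumero (st : Option (List Int × List Int)) : Option (List Int × List Int) :=
  match st with
  | none => none
  | some (p, d) =>
    match PySem.List.pop? d (-1) with      -- depile.pop()
    | none => none
    | some (x, d') => some (p ++ [x], d')  -- pile.append(...)

def depilenumero (pile : List Int) (k : Int) : List Int × Int :=
  -- depile = deque(); for i in range(k): depile.append(pile.pop())
  match (PySem.List.pyRange 0 k 1).foldl (fun st _ => stepA_depilenumero st) (some (pile, [])) with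
  | none => ([], 0)              -- IndexError (excluded by Pre_)
  | some (p, d) =>
    -- element = depile.pop()
    match PySem.List.pop? d (-1) with
    | none => ([], 0)            -- IndexError (excluded by Pre_)
    | some (element, d1) =>
      -- for i in range(len(depile)): pile.append(depile.pop())
      match (PySem.List.pyRange 0 d1.length 1).foldl (fun st _ => stepA2_depilenumero st) (some (p, d1)) with
      | none => ([], 0)
      | some (p2, _) => (p2, element)

-- ===== PORT B =====
def depilenumero_alt (pile : List Int) (k : Int) : List Int × Int :=
  if k < 1 ∨ (pile.length : Int) < k then ([], 0)   -- raise IndexError (excluded by Pre_)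
  else
    match PySem.List.pop? pile ((pile.length : Int) - k) with  -- pile.pop(len(pile) - k)
    | none => ([], 0)   -- unreachable under the guard
    | some (element, p) => (p, element)

-- ===== PRECONDITION & SPEC =====
-- Pre_: exactly the inputs on which A returns normally (otherwise a pop on an empty
-- deque/list raises IndexError).
def Pre_depilenumero (pile : List Int) (k : Int) : Prop := 1 ≤ k ∧ k ≤ (pile.length : Int)
instance (pile : List Int) (k : Int) : Decidable (Pre_depilenumero pile k) := by unfold Pre_depilenumero; infer_instance

def pvWitness_depilenumero : List Int × Int := ([3, 1, 4, 1, 5], 2)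

def Spec_depilenumero (pile : List Int) (k : Int) (out : List Int × Int) : Prop := out = depilenumero_alt pile k
instance (pile : List Int) (k : Int) (out : List Int × Int) : Decidable (Spec_depilenumero pile k out) := by unfold Spec_depilenumero; infer_instance

-- ===== CLAIM (what is proved, stated in full; the proofs are below) =====
def Claim_equal_depilenumero : Prop := ∀ (pile : List Int) (k : Int), Dom_depilenumero pile k → Pre_depilenumero pile k → Spec_depilenumero pile k (depilenumero pile k)

-- ===== LEMMAS AND PROOFS =====

-- a fold that ignores the list elements is an iterate of its step
theorem foldl_ignore_iterate {S : Type} (g : S → S) (l : List Int) (s : S) :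
    l.foldl (fun st _ => g st) s = g^[l.length] s := by
  induction l generalizing s with
  | nil => rfl
  | cons x xs ih =>
    simp only [List.foldl_cons, List.length_cons, Function.iterate_succ_apply]
    exact ih (g s)

theorem stepA_iterate (m : Nat) : ∀ (p d : List Int), m ≤ p.length →
    stepA_depilenumero^[m] (some (p, d)) =
      some (p.take (p.length - m), d ++ (p.drop (p.length - m)).reverse) := by
  induction m with
  | zero => intro p d _; simp
  | succ m ih =>
    intro p d hm
    have hp : p ≠ [] := by rintro rfl; simp at hm
    obtain ⟨q, x, rfl⟩ : ∃ q x, p = q ++ [x] := by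
      rcases List.eq_nil_or_concat p with h | ⟨q, x, h⟩
      · exact absurd h hp
      · exact ⟨q, x, by simpa [List.concat_eq_append] using h⟩
    rw [Function.iterate_succ_apply]
    have h1 : stepA_depilenumero (some (q ++ [x], d)) = some (q, d ++ [x]) := by
      simp [stepA_depilenumero, PySem.List.pop?_last]
    rw [h1, ih q (d ++ [x]) (by simp at hm ⊢; omega)]
    have hlen : (q ++ [x]).length = q.length + 1 := by simp
    have hq : q.length - m ≤ q.length := Nat.sub_le _ _
    have hsub : (q ++ [x]).length - (m + 1) = q.length - m := by simp
    rw [hsub, List.take_append_of_le_length hq, List.drop_append_of_le_length hq]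
    simp

theorem stepA2_iterate (m : Nat) : ∀ (p d : List Int), d.length = m →
    stepA2_depilenumero^[m] (some (p, d)) = some (p ++ d.reverse, []) := by
  induction m with
  | zero => intro p d hd; simp [List.eq_nil_of_length_eq_zero hd]
  | succ m ih =>
    intro p d hd
    have hp : d ≠ [] := by rintro rfl; simp at hd
    obtain ⟨q, x, rfl⟩ : ∃ q x, d = q ++ [x] := by
      rcases List.eq_nil_or_concat d with h | ⟨q, x, h⟩
      · exact absurd h hp
      · exact ⟨q, x, by simpa [List.concat_eq_append] using h⟩
    rw [Function.iterate_succ_apply]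
    have h1 : stepA2_depilenumero (some (p, q ++ [x])) = some (p ++ [x], q) := by
      simp [stepA2_depilenumero, PySem.List.pop?_last]
    rw [h1, ih (p ++ [x]) q (by simp at hd; omega)]
    simp

-- ===== VERDICT (by name: the statement is the Claim_ definition above) =====
theorem depilenumero_spec : Claim_equal_depilenumero := by
  intro pile k _ hpre
  obtain ⟨hk1, hk2⟩ := hpre
  unfold Spec_depilenumero
  set n := pile.length with hn
  -- k as a natural number, 1 ≤ kn ≤ n
  have hk0 : 0 ≤ k := le_trans (by norm_num) hk1
  set kn := k.toNat with hkn
  have hkeq : (kn : Int) = k := Int.toNat_of_nonneg hk0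
  have hkn1 : 1 ≤ kn := by omega
  have hknn : kn ≤ n := by omega
  -- A's first loop
  have hlen : (PySem.List.pyRange 0 k 1).length = kn := by
    rw [PySem.List.length_pyRange_one]; omega
  unfold depilenumero
  rw [foldl_ignore_iterate, hlen, stepA_iterate kn pile [] (by omega)]
  -- the deque d and the popped element
  have hdrop_ne : pile.drop (n - kn) ≠ [] := by
    intro h
    have := List.length_drop (l := pile) (i := n - kn)
    rw [h] at this; simp at this; omega
  obtain ⟨y, ys, hys⟩ := List.exists_cons_of_ne_nil hdrop_ne
  have hyget : pile[n - kn]'(by omega) = y := by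
    have h0 : (pile.drop (n - kn))[0]'(by rw [hys]; simp) = y := by simp [hys]
    rw [List.getElem_drop] at h0
    simpa using h0
  have hrev : (pile.drop (n - kn)).reverse = ys.reverse ++ [y] := by simp [hys]
  rw [hrev]
  simp only [List.nil_append, PySem.List.pop?_last]
  rw [foldl_ignore_iterate]
  have hlen2 : (PySem.List.pyRange 0 (ys.reverse.length : Int) 1).length = ys.reverse.length := by
    rw [PySem.List.length_pyRange_one]; omega
  rw [hlen2, stepA2_iterate (ys.reverse.length) _ ys.reverse rfl]
  simp only [List.reverse_reverse]
  -- B's side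
  unfold depilenumero_alt
  rw [if_neg (by simp; omega)]
  have hcast : (pile.length : Int) - k = ((n - kn : Nat) : Int) := by omega
  rw [hcast, PySem.List.pop?_natCast pile (n - kn) (by omega)]
  simp only [hyget]
  have herase : pile.eraseIdx (n - kn) = pile.take (n - kn) ++ ys := by
    rw [List.eraseIdx_eq_take_drop_succ]
    have h2 : pile.drop (n - kn + 1) = ys := by
      have h3 : pile.drop (n - kn + 1) = (pile.drop (n - kn)).drop 1 := by
        rw [List.drop_drop]
      rw [h3, hys]
      simp
    rw [h2]
  rw [herase]
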